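-- pv_equiv track=rewrite | github.com/brodykellish/cube | tests/test_all_shaders.py | extract_error_details
-- ===== SOURCE A (Python) =====
-- from typing import Dict, List, Tuple, Optional
--
-- def extract_error_details(error_message: str) -> Dict[str, str]:
--     """Extract useful error details from error message."""
--     details = {}
--
--     lines = error_message.split('\n')
--     for line in lines:
--         line = line.strip()
--         if not line:
--             continue
--
--         # Look for common error patterns
--         if "error" in line.lower():
--             details['error_line'] = line
--
--         # Extract specific issues
--         if "undeclared identifier" in line.lower():
--             details['issue'] = "undeclared_identifier"
--         elif "no matching overloaded function" in line.lower():
--             details['issue'] = "function_overload"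
--         elif "cannot convert" in line.lower():
--             details['issue'] = "type_conversion"
--         elif "syntax" in line.lower():
--             details['issue'] = "syntax"
--         elif "texture" in line.lower():
--             details['issue'] = "texture_function"
--
--     return details
-- ===== SOURCE B (Python) =====
-- _PATTERNS = (
--     ("undeclared identifier", "undeclared_identifier"),
--     ("no matching overloaded function", "function_overload"),
--     ("cannot convert", "type_conversion"),
--     ("syntax", "syntax"),
--     ("texture", "texture_function"),
-- )
--
--
-- def extract_error_details(error_message: str) -> dict:
--     """Extract useful error details from error message."""
--     lines = [line.strip() for line in error_message.split('\n')]
--     err = next((line for line in reversed(lines) if "error" in line.lower()), None)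
--     issue = next((label for line in reversed(lines)
--                   for sub, label in _PATTERNS if sub in line.lower()), None)
--     details = {}
--     if err is not None:
--         details['error_line'] = err
--     if issue is not None:
--         details['issue'] = issue
--     return details
-- ===== Notes on version B (the rewrite author's own statement) =====
-- stated objective: alternative
-- what changed: A mutates a dict in one forward pass over all lines; B runs two independent backward scans with early exit (last 'error' line, last line matching an ordered pattern table) and assembles the dict once at the end in a fixed key order; Pre_ excludes inputs where an issue-pattern line without 'error' precedes every 'error' line: there the two programs return the same mapping but list the keys in different orders, and neither key order is specified for this result dict.
import Mathlib
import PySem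

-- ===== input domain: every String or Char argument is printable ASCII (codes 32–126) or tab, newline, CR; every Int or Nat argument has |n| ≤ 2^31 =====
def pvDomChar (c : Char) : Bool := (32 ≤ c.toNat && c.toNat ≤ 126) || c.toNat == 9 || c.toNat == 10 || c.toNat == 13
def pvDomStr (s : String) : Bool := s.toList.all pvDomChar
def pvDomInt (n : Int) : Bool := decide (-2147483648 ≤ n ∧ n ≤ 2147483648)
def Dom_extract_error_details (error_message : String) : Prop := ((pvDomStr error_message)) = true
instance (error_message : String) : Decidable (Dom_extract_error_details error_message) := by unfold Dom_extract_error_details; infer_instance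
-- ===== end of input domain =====

-- B replaces A's forward dict-mutating pass by two backward scans with early exit and a
-- final fixed-order assembly (objective: alternative, same cost).

-- ===== PORT A =====
-- loop body of A: strip, skip empty, record 'error_line', elif chain for 'issue'
def pvStepA (details : PySem.Dict String String) (raw : String) : PySem.Dict String String :=
  let line := PySem.Str.strip raw
  if line = "" then details
  else
    let details :=
      if PySem.Str.isIn "error" (PySem.Str.lower line) then details.insert "error_line" line
      else details
    if PySem.Str.isIn "undeclared identifier" (PySem.Str.lower line) then
      details.insert "issue" "undeclared_identifier"
    else if PySem.Str.isIn "no matching overloaded function" (PySem.Str.lower line) then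
      details.insert "issue" "function_overload"
    else if PySem.Str.isIn "cannot convert" (PySem.Str.lower line) then
      details.insert "issue" "type_conversion"
    else if PySem.Str.isIn "syntax" (PySem.Str.lower line) then
      details.insert "issue" "syntax"
    else if PySem.Str.isIn "texture" (PySem.Str.lower line) then
      details.insert "issue" "texture_function"
    else details

def extract_error_details (error_message : String) : List (String × String) :=
  (((PySem.Str.split? error_message "\n").getD []).foldl pvStepA PySem.Dict.empty).items

-- ===== PORT B =====
def pvPatterns : List (String × String) :=
  [("undeclared identifier", "undeclared_identifier"),
   ("no matching overloaded function", "function_overload"),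
   ("cannot convert", "type_conversion"),
   ("syntax", "syntax"),
   ("texture", "texture_function")]

def extract_error_details_alt (error_message : String) : List (String × String) :=
  let lines := ((PySem.Str.split? error_message "\n").getD []).map PySem.Str.strip
  -- err = next((line for line in reversed(lines) if "error" in line.lower()), None)
  let err := lines.reverse.find? (fun l => PySem.Str.isIn "error" (PySem.Str.lower l))
  -- issue = next((label for line in reversed(lines) for sub, label in _PATTERNS if sub in line.lower()), None)
  let issue := lines.reverse.findSome?
    (fun l => (pvPatterns.find? (fun p => PySem.Str.isIn p.1 (PySem.Str.lower l))).map (·.2))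
  let d : PySem.Dict String String := PySem.Dict.empty
  let d := match err with | some e => d.insert "error_line" e | none => d
  let d := match issue with | some i => d.insert "issue" i | none => d
  d.items

-- ===== PRECONDITION & SPEC =====
-- input-side predicates used by Pre_: does a (stripped, lowercased) line contain "error" / match a pattern?
def pvHasErr (raw : String) : Bool := PySem.Str.isIn "error" (PySem.Str.lower (PySem.Str.strip raw))
def pvPat (raw : String) : Option String :=
  (pvPatterns.find? (fun p => PySem.Str.isIn p.1 (PySem.Str.lower (PySem.Str.strip raw)))).map (·.2)
def pvQual (raw : String) : Bool := pvHasErr raw || (pvPat raw).isSome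
def pvPreL (lines : List String) : Bool :=
  lines.all (fun l => !pvHasErr l) || (lines.find? pvQual).all pvHasErr

-- Pre_ excludes inputs where a line matching an issue pattern but not containing "error" precedes
-- every "error"-containing line: there both programs return the same mapping but list the keys in
-- different orders (A by insertion order, B with 'error_line' first), and neither order is specified.
def Pre_extract_error_details (error_message : String) : Prop :=
  pvPreL ((PySem.Str.split? error_message "\n").getD []) = true
instance (error_message : String) : Decidable (Pre_extract_error_details error_message) := by unfold Pre_extract_error_details; infer_instance

def pvWitness_extract_error_details : String := "error: syntax"

def Spec_extract_error_details (error_message : String) (out : List (String × String)) : Prop := out = extract_error_details_alt error_message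
instance (error_message : String) (out : List (String × String)) : Decidable (Spec_extract_error_details error_message out) := by unfold Spec_extract_error_details; infer_instance

-- ===== CLAIM (what is proved, stated in full; the proofs are below) =====
def Claim_equal_extract_error_details : Prop := ∀ (error_message : String), Dom_extract_error_details error_message → Pre_extract_error_details error_message → Spec_extract_error_details error_message (extract_error_details error_message)

-- ===== LEMMAS AND PROOFS =====
-- both programs' output as a function of (last error line, last issue label)
def pvOut (e? i? : Option String) : List (String × String) :=
  (match e? with | some e => [("error_line", e)] | none => []) ++
  (match i? with | some i => [("issue", i)] | none => [])

-- forward one-line updates of the two components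
def pvUpdE (e? : Option String) (raw : String) : Option String :=
  if pvHasErr raw then some (PySem.Str.strip raw) else e?
def pvUpdI (i? : Option String) (raw : String) : Option String :=
  match pvPat raw with | some lab => some lab | none => i?

lemma pvFind_eq (low : String) :
    (pvPatterns.find? (fun p => PySem.Str.isIn p.1 low)).map (·.2) =
      (if PySem.Str.isIn "undeclared identifier" low then some "undeclared_identifier"
       else if PySem.Str.isIn "no matching overloaded function" low then some "function_overload"
       else if PySem.Str.isIn "cannot convert" low then some "type_conversion"
       else if PySem.Str.isIn "syntax" low then some "syntax"
       else if PySem.Str.isIn "texture" low then some "texture_function"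
       else none) := by
  simp only [pvPatterns, List.find?]
  cases PySem.Str.isIn "undeclared identifier" low <;>
  cases PySem.Str.isIn "no matching overloaded function" low <;>
  cases PySem.Str.isIn "cannot convert" low <;>
  cases PySem.Str.isIn "syntax" low <;>
  cases PySem.Str.isIn "texture" low <;> rfl

set_option maxHeartbeats 1000000 in
-- one step of A, expressed on the (last error line, last issue label) abstraction
lemma pvStep_items (e? i? : Option String) (raw : String)
    (hwf : e? = none → i?.isSome = true → pvHasErr raw = false) :
    pvStepA ⟨pvOut e? i?⟩ raw = ⟨pvOut (pvUpdE e? raw) (pvUpdI i? raw)⟩ := by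
  by_cases hl : PySem.Str.strip raw = ""
  · have h1 : pvHasErr raw = false := by unfold pvHasErr; rw [hl]; decide
    have h2 : pvPat raw = none := by unfold pvPat; rw [hl]; decide
    simp [pvStepA, hl, pvUpdE, pvUpdI, h1, h2]
  · simp only [pvStepA, if_neg hl]
    unfold pvUpdE pvUpdI pvPat pvHasErr
    rw [pvFind_eq]
    rcases e? with _ | e
    · rcases i? with _ | i
      · cases PySem.Str.isIn "error" (PySem.Str.lower (PySem.Str.strip raw)) <;>
        cases PySem.Str.isIn "undeclared identifier" (PySem.Str.lower (PySem.Str.strip raw)) <;>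
        cases PySem.Str.isIn "no matching overloaded function" (PySem.Str.lower (PySem.Str.strip raw)) <;>
        cases PySem.Str.isIn "cannot convert" (PySem.Str.lower (PySem.Str.strip raw)) <;>
        cases PySem.Str.isIn "syntax" (PySem.Str.lower (PySem.Str.strip raw)) <;>
        cases PySem.Str.isIn "texture" (PySem.Str.lower (PySem.Str.strip raw)) <;>
          simp [pvOut, PySem.Dict.insert, PySem.Dict.contains]
      · have he : pvHasErr raw = false := hwf rfl rfl
        unfold pvHasErr at he
        rw [he]
        cases PySem.Str.isIn "undeclared identifier" (PySem.Str.lower (PySem.Str.strip raw)) <;>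
        cases PySem.Str.isIn "no matching overloaded function" (PySem.Str.lower (PySem.Str.strip raw)) <;>
        cases PySem.Str.isIn "cannot convert" (PySem.Str.lower (PySem.Str.strip raw)) <;>
        cases PySem.Str.isIn "syntax" (PySem.Str.lower (PySem.Str.strip raw)) <;>
        cases PySem.Str.isIn "texture" (PySem.Str.lower (PySem.Str.strip raw)) <;>
          simp [pvOut, PySem.Dict.insert, PySem.Dict.contains]
    · rcases i? with _ | i <;>
      · cases PySem.Str.isIn "error" (PySem.Str.lower (PySem.Str.strip raw)) <;>
        cases PySem.Str.isIn "undeclared identifier" (PySem.Str.lower (PySem.Str.strip raw)) <;>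
        cases PySem.Str.isIn "no matching overloaded function" (PySem.Str.lower (PySem.Str.strip raw)) <;>
        cases PySem.Str.isIn "cannot convert" (PySem.Str.lower (PySem.Str.strip raw)) <;>
        cases PySem.Str.isIn "syntax" (PySem.Str.lower (PySem.Str.strip raw)) <;>
        cases PySem.Str.isIn "texture" (PySem.Str.lower (PySem.Str.strip raw)) <;>
          simp [pvOut, PySem.Dict.insert, PySem.Dict.contains]

lemma preL_tail (raw : String) (rest : List String)
    (hq : pvQual raw = false) (h : pvPreL (raw :: rest) = true) : pvPreL rest = true := by
  have he : pvHasErr raw = false := by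
    unfold pvQual at hq
    exact (Bool.or_eq_false_iff.mp hq).1
  simp only [pvPreL, List.all_cons, List.find?_cons, hq, he] at h ⊢
  simpa using h

lemma preL_qual_noerr (raw : String) (rest : List String)
    (hq : pvQual raw = true) (he : pvHasErr raw = false) (h : pvPreL (raw :: rest) = true) :
    rest.all (fun r => !pvHasErr r) = true := by
  simp only [pvPreL, List.all_cons, List.find?_cons, hq, he] at h
  rcases (by simpa using h : (∀ x ∈ rest, pvHasErr x = false) ∨ pvHasErr raw = true) with h' | h'
  · simp only [List.all_eq_true, Bool.not_eq_true']
    exact h'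
  · exact absurd h' (by simp [he])

lemma pvFold (raws : List String) (e? i? : Option String)
    (hp : e? = none → i? = none → pvPreL raws = true)
    (ha : e? = none → i?.isSome = true → raws.all (fun r => !pvHasErr r) = true) :
    raws.foldl pvStepA ⟨pvOut e? i?⟩ = ⟨pvOut (raws.foldl pvUpdE e?) (raws.foldl pvUpdI i?)⟩ := by
  induction raws generalizing e? i? with
  | nil => rfl
  | cons raw rest ih =>
    have hwf : e? = none → i?.isSome = true → pvHasErr raw = false := by
      intro h1 h2
      have := ha h1 h2
      simp only [List.all_cons, Bool.and_eq_true, Bool.not_eq_true'] at this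
      exact this.1
    rw [List.foldl_cons, pvStep_items e? i? raw hwf, List.foldl_cons, List.foldl_cons]
    apply ih
    · intro h1 h2
      have hEe : pvHasErr raw = false ∧ e? = none := by
        unfold pvUpdE at h1
        by_cases hb : pvHasErr raw = true
        · rw [if_pos hb] at h1; exact absurd h1 (by simp)
        · exact ⟨by simpa using hb, by simpa [hb] using h1⟩
      have hIi : pvPat raw = none ∧ i? = none := by
        unfold pvUpdI at h2
        cases hpat : pvPat raw with
        | some lab => rw [hpat] at h2; exact absurd h2 (by simp)
        | none => rw [hpat] at h2; exact ⟨rfl, h2⟩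
      have hq : pvQual raw = false := by
        unfold pvQual; rw [hEe.1, hIi.1]; rfl
      exact preL_tail raw rest hq (hp hEe.2 hIi.2)
    · intro h1 h2
      have hEe : pvHasErr raw = false ∧ e? = none := by
        unfold pvUpdE at h1
        by_cases hb : pvHasErr raw = true
        · rw [if_pos hb] at h1; exact absurd h1 (by simp)
        · exact ⟨by simpa using hb, by simpa [hb] using h1⟩
      cases hi : i? with
      | some i =>
        have := ha hEe.2 (by rw [hi]; rfl)
        simp only [List.all_cons, Bool.and_eq_true] at this
        exact this.2
      | none =>
        have hpat : (pvPat raw).isSome = true := by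
          unfold pvUpdI at h2
          cases hpat : pvPat raw with
          | some lab => rfl
          | none => rw [hpat, hi] at h2; exact absurd h2 (by simp)
        have hq : pvQual raw = true := by
          unfold pvQual; rw [hpat]; simp
        exact preL_qual_noerr raw rest hq hEe.1 (hp hEe.2 hi)

-- a left fold keeping the LAST match equals find? on the reversed list
lemma lastE (raws : List String) (e? : Option String) :
    raws.foldl pvUpdE e? =
      ((raws.map PySem.Str.strip).reverse.find?
        (fun l => PySem.Str.isIn "error" (PySem.Str.lower l))).or e? := by
  induction raws generalizing e? with
  | nil => simp
  | cons raw rest ih =>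
    rw [List.foldl_cons, ih]
    rw [List.map_cons, List.reverse_cons, List.find?_append, Option.or_assoc]
    have hsing : List.find? (fun l => PySem.Str.isIn "error" (PySem.Str.lower l))
        [PySem.Str.strip raw] = (if pvHasErr raw = true then some (PySem.Str.strip raw) else none) := by
      rw [List.find?_cons]
      unfold pvHasErr
      cases PySem.Str.isIn "error" (PySem.Str.lower (PySem.Str.strip raw)) <;> simp
    rw [hsing]
    cases h : pvHasErr raw <;> simp [pvUpdE, h]

lemma lastI (raws : List String) (i? : Option String) :
    raws.foldl pvUpdI i? =
      ((raws.map PySem.Str.strip).reverse.findSome?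
        (fun l => (pvPatterns.find? (fun p => PySem.Str.isIn p.1 (PySem.Str.lower l))).map (·.2))).or i? := by
  induction raws generalizing i? with
  | nil => simp
  | cons raw rest ih =>
    rw [List.foldl_cons, ih]
    rw [List.map_cons, List.reverse_cons, List.findSome?_append, Option.or_assoc]
    have hsing : List.findSome?
        (fun l => (pvPatterns.find? (fun p => PySem.Str.isIn p.1 (PySem.Str.lower l))).map (·.2))
        [PySem.Str.strip raw] = pvPat raw := by
      rw [List.findSome?_cons]
      unfold pvPat
      cases (pvPatterns.find? (fun p => PySem.Str.isIn p.1 (PySem.Str.lower (PySem.Str.strip raw)))).map (·.2) <;> simp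
    rw [hsing]
    cases hpat : pvPat raw <;> simp [pvUpdI, hpat]

-- ===== VERDICT (by name: the statement is the Claim_ definition above) =====
theorem extract_error_details_spec : Claim_equal_extract_error_details := by
  intro s _ hpre
  show extract_error_details s = extract_error_details_alt s
  have h0 : PySem.Dict.empty = (⟨pvOut none none⟩ : PySem.Dict String String) := rfl
  have hA : extract_error_details s =
      pvOut (((((PySem.Str.split? s "\n").getD []).map PySem.Str.strip).reverse.find?
                (fun l => PySem.Str.isIn "error" (PySem.Str.lower l))))
            (((((PySem.Str.split? s "\n").getD []).map PySem.Str.strip).reverse.findSome?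
                (fun l => (pvPatterns.find? (fun p => PySem.Str.isIn p.1 (PySem.Str.lower l))).map (·.2)))) := by
    unfold extract_error_details
    rw [h0, pvFold ((PySem.Str.split? s "\n").getD []) none none
          (fun _ _ => hpre) (by intro _ h; exact absurd h (by simp)),
        lastE, lastI, Option.or_none, Option.or_none]
  have hB : extract_error_details_alt s =
      pvOut (((((PySem.Str.split? s "\n").getD []).map PySem.Str.strip).reverse.find?
                (fun l => PySem.Str.isIn "error" (PySem.Str.lower l))))
            (((((PySem.Str.split? s "\n").getD []).map PySem.Str.strip).reverse.findSome?
                (fun l => (pvPatterns.find? (fun p => PySem.Str.isIn p.1 (PySem.Str.lower l))).map (·.2)))) := by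
    simp only [extract_error_details_alt]
    generalize ((((PySem.Str.split? s "\n").getD []).map PySem.Str.strip).reverse.find?
                (fun l => PySem.Str.isIn "error" (PySem.Str.lower l))) = eo
    generalize ((((PySem.Str.split? s "\n").getD []).map PySem.Str.strip).reverse.findSome?
                (fun l => (pvPatterns.find? (fun p => PySem.Str.isIn p.1 (PySem.Str.lower l))).map (·.2))) = io
    cases eo <;> cases io <;>
      simp [pvOut, PySem.Dict.insert, PySem.Dict.contains, PySem.Dict.empty]
  rw [hA, hB]
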